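-- pv_equiv track=rewrite | github.com/zxgsy520/gffvert | stat_genome.py | scaff2contig
-- ===== SOURCE A (Python) =====
-- def scaff2contig(seq):
--
--     seq = seq.upper()
--     r = []
--     gaplen = seq.count('N')
--
--     for i in seq.split("N"):
--         if len(i) == 0:
--             continue
--         r.append(i)
--
--     return r, len(r)-1, gaplen
-- ===== SOURCE B (Python) =====
-- def scaff2contig(seq):
--     # one-pass character scan: cut at 'N' runs, counting every 'N'
--     seq = seq.upper()
--     contigs = []
--     buf = []
--     gaplen = 0
--     for ch in seq:
--         if ch == 'N':
--             gaplen += 1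
--             if buf:
--                 contigs.append(''.join(buf))
--                 buf = []
--         else:
--             buf.append(ch)
--     if buf:
--         contigs.append(''.join(buf))
--     return contigs, len(contigs) - 1, gaplen
-- ===== Notes on version B (the rewrite author's own statement) =====
-- stated objective: alternative
-- what changed: Replaces count('N') plus split('N') plus a filtering loop (three passes building intermediate empty pieces) with a single character scan maintaining a current buffer, the contig list and an N counter.
import Mathlib
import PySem

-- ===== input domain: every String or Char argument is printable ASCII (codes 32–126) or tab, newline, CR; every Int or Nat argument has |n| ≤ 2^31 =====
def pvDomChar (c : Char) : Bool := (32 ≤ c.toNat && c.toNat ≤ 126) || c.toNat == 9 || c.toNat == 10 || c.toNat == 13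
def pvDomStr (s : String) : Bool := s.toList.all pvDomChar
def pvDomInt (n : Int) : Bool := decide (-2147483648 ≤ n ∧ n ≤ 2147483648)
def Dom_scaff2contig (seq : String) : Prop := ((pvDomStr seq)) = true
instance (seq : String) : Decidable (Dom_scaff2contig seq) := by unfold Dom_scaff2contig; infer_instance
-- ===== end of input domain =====

-- B replaces A's count + split + filtering loop (three passes) with one character scan
-- keeping a current buffer, the contig list and an N counter; same return value.

-- ===== PORT A =====
def scaff2contig (seq : String) : List String × Int × Int :=
  let s := PySem.Str.upper seq
  let gaplen : Int := (PySem.Str.count s "N" : Int)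
  let parts := (PySem.Str.split? s "N").getD []   -- sep "N" ≠ "": split never raises
  let r := parts.foldl (fun r i => if PySem.Str.len i = 0 then r else r ++ [i]) []
  (r, (r.length : Int) - 1, gaplen)

-- ===== PORT B =====
def scaff2contig_alt (seq : String) : List String × Int × Int :=
  let s := PySem.Str.upper seq
  let st := s.toList.foldl
    (fun (st : List String × List Char × Int) ch =>
      let (contigs, buf, gaplen) := st
      if ch == 'N' then
        ((if buf.isEmpty then contigs else contigs ++ [String.ofList buf]), [], gaplen + 1)
      else
        (contigs, buf ++ [ch], gaplen))
    ([], [], 0)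
  let contigs := if st.2.1.isEmpty then st.1 else st.1 ++ [String.ofList st.2.1]
  (contigs, (contigs.length : Int) - 1, st.2.2)

-- ===== PRECONDITION & SPEC =====
def Spec_scaff2contig (seq : String) (out : List String × Int × Int) : Prop := out = scaff2contig_alt seq
instance (seq : String) (out : List String × Int × Int) : Decidable (Spec_scaff2contig seq out) := by unfold Spec_scaff2contig; infer_instance

-- ===== CLAIM (what is proved, stated in full; the proofs are below) =====
def Claim_equal_scaff2contig : Prop := ∀ (seq : String), Dom_scaff2contig seq → Spec_scaff2contig seq (scaff2contig seq)

-- ===== LEMMAS AND PROOFS =====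

/-- Reference split-on-'N' with an in-order current piece. -/
def pvSplitN : List Char → List Char → List (List Char)
  | [], cur => [cur]
  | c :: rest, cur => if c = 'N' then cur :: pvSplitN rest [] else pvSplitN rest (cur ++ [c])

lemma pv_go_spec : ∀ (fuel : Nat) (l cur : List Char) (acc : List (List Char)),
    l.length ≤ fuel →
    PySem.Chars.splitOn.go ['N'] fuel l cur acc = acc.reverse ++ pvSplitN l cur.reverse := by
  intro fuel
  induction fuel with
  | zero =>
    intro l cur acc h
    have : l = [] := List.eq_nil_of_length_eq_zero (Nat.le_zero.mp h)
    subst this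
    simp [PySem.Chars.splitOn.go, pvSplitN]
  | succ n ih =>
    intro l cur acc h
    cases l with
    | nil => simp [PySem.Chars.splitOn.go, pvSplitN]
    | cons c rest =>
      simp only [PySem.Chars.splitOn.go]
      by_cases hc : c = 'N'
      · subst hc
        rw [if_pos (by simp [List.isPrefixOf])]
        simp only [List.length_cons] at h
        rw [show List.drop ['N'].length ('N' :: rest) = rest from rfl]
        rw [ih rest [] (cur.reverse :: acc) (by omega)]
        simp [pvSplitN]
      · rw [if_neg (by simp [List.isPrefixOf, hc]; intro h'; exact hc h'.symm)]
        simp only [List.length_cons] at h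
        rw [ih rest (c :: cur) acc (by omega)]
        simp [pvSplitN, hc]

lemma pv_splitOn_eq (l : List Char) : PySem.Chars.splitOn l ['N'] = pvSplitN l [] := by
  unfold PySem.Chars.splitOn
  rw [pv_go_spec (l.length + 1) l [] [] (by omega)]
  simp

lemma pv_count_go_spec : ∀ (fuel : Nat) (l : List Char) (acc : Nat), l.length ≤ fuel →
    PySem.Chars.count.go ['N'] fuel l acc = acc + l.count 'N' := by
  intro fuel
  induction fuel with
  | zero =>
    intro l acc h
    have : l = [] := List.eq_nil_of_length_eq_zero (Nat.le_zero.mp h)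
    subst this; simp [PySem.Chars.count.go]
  | succ n ih =>
    intro l acc h
    cases l with
    | nil => simp [PySem.Chars.count.go]
    | cons c rest =>
      simp only [PySem.Chars.count.go]
      by_cases hc : c = 'N'
      · subst hc
        rw [if_pos (by simp [List.isPrefixOf])]
        rw [show List.drop ['N'].length ('N' :: rest) = rest from rfl]
        simp only [List.length_cons] at h
        rw [ih rest (acc + 1) (by omega)]
        simp [List.count_cons]
        omega
      · rw [if_neg (by simp [List.isPrefixOf, hc]; intro h'; exact hc h'.symm)]
        simp only [List.length_cons] at h
        rw [ih rest acc (by omega)]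
        simp [List.count_cons, hc]

lemma pv_count_eq (l : List Char) : PySem.Chars.count l ['N'] = l.count 'N' := by
  unfold PySem.Chars.count
  rw [if_neg (by simp)]
  rw [pv_count_go_spec l.length l 0 le_rfl]
  omega

/-- A's filtering foldl is a filter. -/
lemma pv_foldl_filter (parts acc : List String) :
    parts.foldl (fun r i => if PySem.Str.len i = 0 then r else r ++ [i]) acc
      = acc ++ parts.filter (fun i => !(i.toList.length == 0)) := by
  induction parts generalizing acc with
  | nil => simp
  | cons p rest ih =>
    simp only [List.foldl_cons, List.filter_cons]
    by_cases hp : p = ""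
    · subst hp
      rw [if_pos (by decide), ih]
      simp
    · have h0 : p.toList.length ≠ 0 := by
        simpa [List.length_eq_zero_iff] using hp
      rw [if_neg (by rw [PySem.Str.len_eq]; exact_mod_cast h0), ih]
      simp [h0, hp]

/-- scan: completed pieces and the trailing buffer of pvSplitN. -/
def pvScan : List Char → List Char → List (List Char) × List Char
  | [], buf => ([], buf)
  | c :: rest, buf =>
    if c = 'N' then
      let p := pvScan rest []
      (buf :: p.1, p.2)
    else pvScan rest (buf ++ [c])

lemma pv_splitN_eq_scan (l buf : List Char) :
    pvSplitN l buf = (pvScan l buf).1 ++ [(pvScan l buf).2] := by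
  induction l generalizing buf with
  | nil => simp [pvSplitN, pvScan]
  | cons c rest ih =>
    simp only [pvSplitN, pvScan]
    split_ifs with hc <;> simp [ih]

/-- B's fold invariant. -/
lemma pv_foldB (l : List Char) : ∀ (contigs : List String) (buf : List Char) (g : Int),
    l.foldl
      (fun (st : List String × List Char × Int) ch =>
        let (contigs, buf, gaplen) := st
        if ch == 'N' then
          ((if buf.isEmpty then contigs else contigs ++ [String.ofList buf]), [], gaplen + 1)
        else (contigs, buf ++ [ch], gaplen))
      (contigs, buf, g)
    = (contigs ++ ((pvScan l buf).1.filter (fun p => !p.isEmpty)).map String.ofList,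
       (pvScan l buf).2, g + (l.count 'N' : Int)) := by
  induction l with
  | nil => intro contigs buf g; simp [pvScan]
  | cons c rest ih =>
    intro contigs buf g
    simp only [List.foldl_cons]
    by_cases hc : c = 'N'
    · subst hc
      rw [show (('N' == 'N') = true) from rfl]
      simp only [if_true]
      rw [ih]
      by_cases hb : buf.isEmpty
      · have hbuf : buf = [] := by simpa using hb
        subst hbuf
        rw [if_pos hb]
        simp [pvScan, List.count_cons]
        ring
      · rw [if_neg hb]
        simp [pvScan, hb, List.count_cons]
        ring
    · rw [show ((c == 'N') = false) by simpa using hc]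
      simp only [Bool.false_eq_true, if_false]
      rw [ih]
      simp [pvScan, hc, List.count_cons]

lemma pv_filter_append_last (ps : List (List Char)) (b : List Char) :
    (ps ++ [b]).filter (fun p => !p.isEmpty)
      = ps.filter (fun p => !p.isEmpty) ++ (if b.isEmpty then [] else [b]) := by
  rw [List.filter_append]
  congr 1
  split_ifs with h <;> simp [h]

-- ===== VERDICT (by name: the statement is the Claim_ definition above) =====
theorem scaff2contig_spec : Claim_equal_scaff2contig := by
  intro seq _
  simp only [Spec_scaff2contig, scaff2contig, scaff2contig_alt]
  generalize PySem.Str.upper seq = s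
  generalize hl : s.toList = l
  have hsplit : (PySem.Str.split? s "N").getD [] = (pvSplitN l []).map String.ofList := by
    have h1 := PySem.Str.split?_map s "N"
    have h2 : PySem.Chars.split? s.toList "N".toList = some (pvSplitN l []) := by
      unfold PySem.Chars.split?
      rw [if_neg (by simp)]
      rw [show ("N".toList) = ['N'] from rfl, hl, pv_splitOn_eq]
    rw [h2] at h1
    cases hsp : PySem.Str.split? s "N" with
    | none => rw [hsp] at h1; simp at h1
    | some parts =>
      rw [hsp] at h1
      simp only [Option.map_some, Option.some.injEq] at h1
      have h3 : (parts.map String.toList).map String.ofList = parts := by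
        rw [List.map_map]
        simp [Function.comp_def]
      rw [h1] at h3
      rw [Option.getD_some, ← h3]
  have hcount : PySem.Str.count s "N" = l.count 'N' := by
    rw [PySem.Str.count_eq, show ("N".toList) = ['N'] from rfl, hl, pv_count_eq]
  rw [hsplit, hcount, pv_foldl_filter, pv_foldB]
  have hkey : ((pvSplitN l []).map String.ofList).filter (fun i => !(i.toList.length == 0))
      = ((pvScan l []).1.filter (fun p => !p.isEmpty)).map String.ofList
        ++ (if (pvScan l []).2.isEmpty then [] else [String.ofList (pvScan l []).2]) := by
    rw [pv_splitN_eq_scan l []]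
    rw [List.filter_map]
    have hfun : ((fun i => !((String.toList i).length == 0)) ∘ String.ofList)
        = (fun p : List Char => !p.isEmpty) := by
      funext p
      cases p <;> simp [Function.comp]
    rw [hfun, pv_filter_append_last, List.map_append]
    congr 1
    split_ifs with h <;> simp
  simp only [List.nil_append, hkey]
  split_ifs with h <;> simp
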